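-- pv_equiv track=rewrite | github.com/SuffolkLITLab/docassemble-ALWeaver | docassemble/ALWeaver/interview_generator.py | _ensure_unique_question_ids
-- ===== SOURCE A (Python) =====
-- from typing import (
--     Any,
--     Dict,
--     List,
--     NotRequired,
--     Mapping,
--     Optional,
--     Sequence,
--     Set,
--     Tuple,
--     Union,
--     Iterable,
--     Literal,
--     TypedDict,
--     cast,
-- )
--
-- def _ensure_unique_question_ids(yaml_text: str) -> str:
--     """Ensure top-level `id:` values are unique by appending a numeric suffix."""
--     lines = yaml_text.splitlines()
--     seen: Dict[str, int] = {}
--     in_metadata = False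
--
--     for idx, line in enumerate(lines):
--         if line.strip() == "metadata:":
--             in_metadata = True
--             continue
--         if in_metadata and line.strip() == "---":
--             in_metadata = False
--             continue
--         if in_metadata:
--             continue
--         if not line.startswith("id: "):
--             continue
--         raw_id = line[4:].strip()
--         if not raw_id:
--             continue
--         count = seen.get(raw_id, 0) + 1
--         seen[raw_id] = count
--         if count > 1:
--             lines[idx] = f"id: {raw_id} {count}"
--     output = "\n".join(lines)
--     return output + ("\n" if yaml_text.endswith("\n") else "")
-- ===== SOURCE B (Python) =====
-- def _ensure_unique_question_ids(yaml_text: str) -> str: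
--     """Index-then-group rewrite: pass 1 records the line indices of each
--     eligible top-level id per raw id; pass 2 walks each group and rewrites
--     every occurrence after the first with its ordinal."""
--     lines = yaml_text.splitlines()
--     positions: dict = {}
--     in_metadata = False
--     for idx, line in enumerate(lines):
--         s = line.strip()
--         if s == "metadata:":
--             in_metadata = True
--         elif in_metadata and s == "---":
--             in_metadata = False
--         elif in_metadata:
--             pass
--         elif line.startswith("id: "):
--             raw_id = line[4:].strip()
--             if raw_id:
--                 positions.setdefault(raw_id, []).append(idx)
--     for raw_id, pos_list in positions.items():
--         for n, pos in enumerate(pos_list[1:], start=2):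
--             lines[pos] = f"id: {raw_id} {n}"
--     return "\n".join(lines) + ("\n" if yaml_text.endswith("\n") else "")
-- ===== Notes on version B (the rewrite author's own statement) =====
-- stated objective: alternative
-- what changed: Replaces A's single streaming pass with an in-place duplicate counter by an index-then-group structure: pass 1 only collects the line indices of eligible id lines per raw id into an insertion-ordered dict of lists, pass 2 iterates the groups and rewrites each occurrence after the first with its 1-based ordinal in the group.
import Mathlib
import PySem

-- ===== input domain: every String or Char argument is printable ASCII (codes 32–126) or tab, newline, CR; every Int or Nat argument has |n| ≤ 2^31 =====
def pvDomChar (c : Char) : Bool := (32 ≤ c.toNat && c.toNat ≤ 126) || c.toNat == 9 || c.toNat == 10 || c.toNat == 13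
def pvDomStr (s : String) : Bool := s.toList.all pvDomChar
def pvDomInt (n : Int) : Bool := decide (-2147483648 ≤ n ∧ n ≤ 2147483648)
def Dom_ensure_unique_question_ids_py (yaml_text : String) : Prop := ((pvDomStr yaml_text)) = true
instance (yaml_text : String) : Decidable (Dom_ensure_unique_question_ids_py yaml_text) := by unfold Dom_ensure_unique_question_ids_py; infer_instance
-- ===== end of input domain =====

-- B replaces A's streaming pass with an in-place duplicate counter by an
-- index-then-group structure: collect per-id position lists, then rewrite each
-- group's later occurrences by their ordinal (alternative structure, same cost).

-- ===== PORT A =====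
-- streaming pass: dict of counts + metadata flag, rewriting a line when its count exceeds 1
def euqA_go : List String → PySem.Dict String Int → Bool → List String
  | [], _, _ => []
  | line :: rest, seen, inMeta =>
    if PySem.Str.strip line = "metadata:" then
      line :: euqA_go rest seen true
    else if inMeta && (PySem.Str.strip line = "---") then
      line :: euqA_go rest seen false
    else if inMeta then
      line :: euqA_go rest seen inMeta
    else if !(PySem.Str.startswith line "id: ") then
      line :: euqA_go rest seen inMeta
    else
      let raw := PySem.Str.strip (PySem.Str.slice line (some 4) none)
      if raw = "" then
        line :: euqA_go rest seen inMeta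
      else
        let count := PySem.Dict.getD seen raw 0 + 1
        (if count > 1 then "id: " ++ raw ++ " " ++ PySem.Int.toStr count else line)
          :: euqA_go rest (PySem.Dict.insert seen raw count) inMeta

def ensure_unique_question_ids_py (yaml_text : String) : String :=
  let lines := PySem.Str.splitlines yaml_text
  PySem.Str.join "\n" (euqA_go lines PySem.Dict.empty false)
    ++ (if PySem.Str.endswith yaml_text "\n" then "\n" else "")

-- ===== PORT B =====
-- pass 1: collect the line indices of the eligible top-level id lines, per raw id
def euqB_collect : List String → Nat → Bool → PySem.Dict String (List Nat) → PySem.Dict String (List Nat)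
  | [], _, _, d => d
  | line :: rest, idx, inMeta, d =>
    if PySem.Str.strip line = "metadata:" then
      euqB_collect rest (idx + 1) true d
    else if inMeta && (PySem.Str.strip line = "---") then
      euqB_collect rest (idx + 1) false d
    else if inMeta then
      euqB_collect rest (idx + 1) inMeta d
    else if PySem.Str.startswith line "id: " then
      let raw := PySem.Str.strip (PySem.Str.slice line (some 4) none)
      if raw = "" then
        euqB_collect rest (idx + 1) false d
      else
        euqB_collect rest (idx + 1) false (PySem.Dict.insert d raw (PySem.Dict.getD d raw [] ++ [idx]))
    else
      euqB_collect rest (idx + 1) false d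

-- pass 2, inner loop: enumerate(pos_list[1:], start=2) rewriting lines[pos]
def euqB_applyGroup (raw : String) : List Nat → Int → List String → List String
  | [], _, lines => lines
  | pos :: ps, n, lines =>
      euqB_applyGroup raw ps (n + 1) (lines.set pos ("id: " ++ raw ++ " " ++ PySem.Int.toStr n))

-- pass 2, outer loop over the collected groups
def euqB_apply : List (String × List Nat) → List String → List String
  | [], lines => lines
  | (raw, ps) :: rest, lines => euqB_apply rest (euqB_applyGroup raw (ps.drop 1) 2 lines)

def ensure_unique_question_ids_py_alt (yaml_text : String) : String :=
  let lines := PySem.Str.splitlines yaml_text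
  let positions := euqB_collect lines 0 false PySem.Dict.empty
  PySem.Str.join "\n" (euqB_apply (PySem.Dict.items positions) lines)
    ++ (if PySem.Str.endswith yaml_text "\n" then "\n" else "")

-- ===== PRECONDITION & SPEC =====
def Spec_ensure_unique_question_ids_py (yaml_text : String) (out : String) : Prop := out = ensure_unique_question_ids_py_alt yaml_text
instance (yaml_text : String) (out : String) : Decidable (Spec_ensure_unique_question_ids_py yaml_text out) := by unfold Spec_ensure_unique_question_ids_py; infer_instance

-- ===== CLAIM (what is proved, stated in full; the proofs are below) =====
def Claim_equal_ensure_unique_question_ids_py : Prop := ∀ (yaml_text : String), Dom_ensure_unique_question_ids_py yaml_text → Spec_ensure_unique_question_ids_py yaml_text (ensure_unique_question_ids_py yaml_text)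

-- ===== LEMMAS AND PROOFS =====

-- eligibility of each line: its raw id if it is a counted top-level id line, else none
def euqE : List String → Bool → List (Option String)
  | [], _ => []
  | line :: rest, inMeta =>
    if PySem.Str.strip line = "metadata:" then
      none :: euqE rest true
    else if inMeta && (PySem.Str.strip line = "---") then
      none :: euqE rest false
    else if inMeta then
      none :: euqE rest true
    else if PySem.Str.startswith line "id: " then
      let r := PySem.Str.strip (PySem.Str.slice line (some 4) none)
      (if r = "" then none else some r) :: euqE rest false
    else
      none :: euqE rest false

-- prefix-count rewrite (intermediate form both ports are reduced to)
def euqR : List (String × Option String) → List (Option String) → List String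
  | [], _ => []
  | (line, e) :: rest, prev =>
    let prev' := prev ++ [e]
    (match e with
     | some r =>
        let c := prev'.count (some r)
        if c > 1 then "id: " ++ r ++ " " ++ PySem.Int.toStr (c : Int) else line
     | none => line) :: euqR rest prev'

-- indices (from offset k) whose eligibility is `some r`
def euqOcc (r : String) : List (Option String) → Nat → List Nat
  | [], _ => []
  | e :: t, k => (if e = some r then [k] else []) ++ euqOcc r t (k + 1)

lemma euqE_length (lines : List String) : ∀ b, (euqE lines b).length = lines.length := by
  induction lines with
  | nil => intro b; rfl
  | cons l t ih => intro b; simp only [euqE]; split_ifs <;> simp [ih]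

lemma euq_count_append_some (prev : List (Option String)) (e : Option String) (r : String) :
    (prev ++ [e]).count (some r) = prev.count (some r) + (if e = some r then 1 else 0) := by
  by_cases h : e = some r
  · subst h; simp [List.count_append]
  · have h0 : List.count (some r) [e] = 0 := by
      rw [List.count_eq_zero]
      simp only [List.mem_singleton]
      exact fun hc => h hc.symm
    simp [List.count_append, h0, h]

-- A's streaming pass equals the prefix-count rewrite
lemma euq_main (lines : List String) : ∀ (inMeta : Bool) (seen : PySem.Dict String Int)
    (prev : List (Option String)),
    (∀ r : String, PySem.Dict.getD seen r 0 = (prev.count (some r) : Int)) →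
    euqA_go lines seen inMeta = euqR (lines.zip (euqE lines inMeta)) prev := by
  induction lines with
  | nil => intro _ _ _ _; simp [euqA_go, euqE, euqR]
  | cons line rest ih =>
    have hskip : ∀ (prev : List (Option String)) (seen : PySem.Dict String Int),
        (∀ r : String, PySem.Dict.getD seen r 0 = (prev.count (some r) : Int)) →
        (∀ r : String, PySem.Dict.getD seen r 0 = ((prev ++ [none]).count (some r) : Int)) := by
      intro prev seen hinv r; rw [euq_count_append_some]; simp [hinv r]
    intro inMeta seen prev hinv
    cases inMeta with
    | true =>
      by_cases h1 : PySem.Str.strip line = "metadata:"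
      · simp only [euqA_go, euqE, if_pos h1, List.zip_cons_cons, euqR]
        exact congrArg _ (ih true seen (prev ++ [none]) (hskip prev seen hinv))
      · by_cases h2 : PySem.Str.strip line = "---"
        · have hb : (true && decide (PySem.Str.strip line = "---")) = true := by simp [h2]
          simp only [euqA_go, euqE, if_neg h1, if_pos hb, List.zip_cons_cons, euqR]
          exact congrArg _ (ih false seen (prev ++ [none]) (hskip prev seen hinv))
        · have hb : ¬ ((true && decide (PySem.Str.strip line = "---")) = true) := by simp [h2]
          simp only [euqA_go, euqE, if_neg h1, if_neg hb]
          exact congrArg _ (ih true seen (prev ++ [none]) (hskip prev seen hinv))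
    | false =>
      have hb : ¬ ((false && decide (PySem.Str.strip line = "---")) = true) := by simp
      have hf : ¬ ((false : Bool) = true) := by simp
      by_cases h1 : PySem.Str.strip line = "metadata:"
      · simp only [euqA_go, euqE, if_pos h1, List.zip_cons_cons, euqR]
        exact congrArg _ (ih true seen (prev ++ [none]) (hskip prev seen hinv))
      · by_cases h4 : PySem.Str.startswith line "id: " = true
        · have h4n : ¬ ((!PySem.Str.startswith line "id: ") = true) := by rw [h4]; simp
          by_cases h5 : PySem.Str.strip (PySem.Str.slice line (some 4) none) = ""
          · simp only [euqA_go, euqE, if_neg h1, if_neg hb, if_neg hf, if_neg h4n,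
              if_pos h4, if_pos h5, List.zip_cons_cons, euqR]
            exact congrArg _ (ih false seen (prev ++ [none]) (hskip prev seen hinv))
          · have hcnt : PySem.Dict.getD seen
                  (PySem.Str.strip (PySem.Str.slice line (some 4) none)) 0 + 1
                = ((prev ++ [some (PySem.Str.strip (PySem.Str.slice line (some 4) none))]).count
                    (some (PySem.Str.strip (PySem.Str.slice line (some 4) none))) : Int) := by
              rw [euq_count_append_some, hinv]; push_cast; simp
            simp only [euqA_go, euqE, if_neg h1, if_neg hb, if_neg hf, if_neg h4n,
              if_pos h4, if_neg h5, List.zip_cons_cons, euqR]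
            set raw := PySem.Str.strip (PySem.Str.slice line (some 4) none) with hraw
            refine congrArg₂ _ ?_ ?_
            · rw [hcnt]
              by_cases hgt : (prev ++ [some raw]).count (some raw) > 1
              · rw [if_pos (by exact_mod_cast hgt), if_pos hgt]
              · rw [if_neg (by exact_mod_cast hgt), if_neg hgt]
            · refine ih false _ (prev ++ [some raw]) ?_
              intro r
              rw [PySem.Dict.getD_insert, euq_count_append_some]
              by_cases hr : r = raw
              · subst hr; rw [if_pos rfl, hcnt]; simp
              · rw [if_neg hr]
                have hne : ¬ (some raw = some r) := fun h => hr (Option.some_inj.mp h).symm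
                simp [hinv r, hne]
        · have hbf : PySem.Str.startswith line "id: " = false := by
            revert h4; cases PySem.Str.startswith line "id: " <;> simp
          have h4p : (!PySem.Str.startswith line "id: ") = true := by rw [hbf]; simp
          simp only [euqA_go, euqE, if_neg h1, if_neg hb, if_neg hf, if_pos h4p,
            if_neg h4, List.zip_cons_cons, euqR]
          exact congrArg _ (ih false seen (prev ++ [none]) (hskip prev seen hinv))

-- pointwise value of the prefix-count rewrite
lemma euqR_length : ∀ (ps : List (String × Option String)) (prev : List (Option String)),
    (euqR ps prev).length = ps.length := by
  intro ps
  induction ps with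
  | nil => intro prev; rfl
  | cons p t ih => obtain ⟨l, e⟩ := p; intro prev; simp [euqR, ih]

lemma euqR_get : ∀ (ls : List String) (es : List (Option String)) (prev : List (Option String))
    (i : Nat), ls.length = es.length → i < ls.length →
    (euqR (ls.zip es) prev)[i]? = some (
      match es.getD i none with
      | some r =>
          if (prev ++ es.take (i+1)).count (some r) > 1 then
            "id: " ++ r ++ " " ++ PySem.Int.toStr (((prev ++ es.take (i+1)).count (some r) : Nat) : Int)
          else ls.getD i ""
      | none => ls.getD i "") := by
  intro ls
  induction ls with
  | nil => intro es prev i _ hi; simp at hi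
  | cons l t ih =>
    intro es prev i hlen hi
    cases es with
    | nil => simp at hlen
    | cons e es' =>
      cases i with
      | zero =>
        simp only [List.zip_cons_cons, euqR, List.getD_cons_zero, List.take_succ_cons,
          List.take_zero]
        cases e with
        | none => simp
        | some r => simp
      | succ i =>
        have hlen' : t.length = es'.length := by simpa using hlen
        have hi' : i < t.length := by simpa using hi
        have := ih es' (prev ++ [e]) i hlen' hi'
        simp only [List.zip_cons_cons, euqR, List.getElem?_cons_succ, List.getD_cons_succ,
          List.take_succ_cons]
        rw [this]
        simp [List.append_assoc]

-- euqOcc facts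
lemma euqOcc_lb (r : String) : ∀ (es : List (Option String)) (k : Nat) (p : Nat),
    p ∈ euqOcc r es k → k ≤ p := by
  intro es
  induction es with
  | nil => intro k p hp; simp [euqOcc] at hp
  | cons e t ih =>
    intro k p hp
    simp only [euqOcc, List.mem_append] at hp
    rcases hp with hp | hp
    · split_ifs at hp with h
      · simp at hp; omega
      · simp at hp
    · have := ih (k+1) p hp; omega

lemma euqOcc_nodup (r : String) : ∀ (es : List (Option String)) (k : Nat),
    (euqOcc r es k).Nodup := by
  intro es
  induction es with
  | nil => intro k; simp [euqOcc]
  | cons e t ih =>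
    intro k
    simp only [euqOcc]
    split_ifs with h
    · simp only [List.singleton_append, List.nodup_cons]
      exact ⟨fun hk => by have := euqOcc_lb r t (k+1) k hk; omega, ih (k+1)⟩
    · simpa using ih (k+1)

lemma euqOcc_mem (r : String) : ∀ (es : List (Option String)) (k p : Nat),
    p ∈ euqOcc r es k → k ≤ p ∧ es.getD (p - k) none = some r ∧ p - k < es.length := by
  intro es
  induction es with
  | nil => intro k p hp; simp [euqOcc] at hp
  | cons e t ih =>
    intro k p hp
    simp only [euqOcc, List.mem_append] at hp
    rcases hp with hp | hp
    · split_ifs at hp with h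
      · simp only [List.mem_singleton] at hp
        subst hp
        refine ⟨le_refl _, ?_, by simp⟩
        simp [h]
      · simp at hp
    · obtain ⟨h1, h2, h3⟩ := ih (k+1) p hp
      refine ⟨by omega, ?_, by simp; omega⟩
      have : p - k = (p - (k+1)) + 1 := by omega
      rw [this]
      simpa using h2
lemma euqOcc_mem_of (r : String) : ∀ (es : List (Option String)) (k i : Nat),
    es.getD i none = some r → i < es.length → (k + i) ∈ euqOcc r es k := by
  intro es
  induction es with
  | nil => intro k i _ hi; simp at hi
  | cons e t ih =>
    intro k i he hi
    cases i with
    | zero =>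
      simp only [List.getD_cons_zero] at he
      simp [euqOcc, he]
    | succ i =>
      simp only [List.getD_cons_succ] at he
      have hi' : i < t.length := by simpa using hi
      have := ih (k+1) i he hi'
      simp only [euqOcc, List.mem_append]
      right
      have : k + (i + 1) = (k + 1) + i := by omega
      rw [this]
      exact ih (k+1) i he hi'

lemma euqOcc_idx (r : String) : ∀ (es : List (Option String)) (k i : Nat),
    es.getD i none = some r → i < es.length →
    (euqOcc r es k).idxOf (k + i) + 1 = (es.take (i+1)).count (some r) := by
  intro es
  induction es with
  | nil => intro k i _ hi; simp at hi
  | cons e t ih =>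
    intro k i he hi
    cases i with
    | zero =>
      simp only [List.getD_cons_zero] at he
      simp [euqOcc, he, List.count_cons]
    | succ i =>
      simp only [List.getD_cons_succ] at he
      have hi' : i < t.length := by simpa using hi
      have hrec := ih (k+1) i he hi'
      have harg : (k + 1) + i = k + (i + 1) := by omega
      rw [harg] at hrec
      by_cases h : e = some r
      · simp only [euqOcc, if_pos h, List.take_succ_cons, List.singleton_append]
        rw [List.idxOf_cons]
        have hb : (k == k + (i + 1)) = false := by simp
        rw [hb]
        simp only [cond_false]
        subst h
        rw [List.count_cons_self]
        omega
      · simp only [euqOcc, if_neg h, List.take_succ_cons, List.nil_append]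
        have hne2 : e ≠ some r := h
        rw [List.count_cons_of_ne hne2]
        exact hrec

-- the collected dict maps each id to its occurrence index list
lemma euqB_collect_getD (lines : List String) : ∀ (k : Nat) (inMeta : Bool)
    (d : PySem.Dict String (List Nat)) (r : String),
    PySem.Dict.getD (euqB_collect lines k inMeta d) r []
      = PySem.Dict.getD d r [] ++ euqOcc r (euqE lines inMeta) k := by
  induction lines with
  | nil => intro k im d r; simp [euqB_collect, euqE, euqOcc]
  | cons line rest ih =>
    intro k im d r
    simp only [euqB_collect, euqE]
    split_ifs with h1 h2 h3 h4 h5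
    · rw [ih]; simp [euqOcc]
    · rw [ih]; simp [euqOcc]
    · rw [ih]; simp [euqOcc, h3]
    · rw [ih]; simp [euqOcc, h5]
    · rw [ih]
      rw [PySem.Dict.getD_insert]
      set raw := PySem.Str.strip (PySem.Str.slice line (some 4) none)
      by_cases hr : r = raw
      · subst hr
        simp [euqOcc, h5, List.append_assoc]
      · rw [if_neg hr]
        have hner : raw ≠ r := fun hh => hr hh.symm
        simp [euqOcc, h5, hner]
    · rw [ih]; simp [euqOcc]

lemma euqB_collect_nodup (lines : List String) : ∀ (k : Nat) (inMeta : Bool)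
    (d : PySem.Dict String (List Nat)), d.keys.Nodup →
    (euqB_collect lines k inMeta d).keys.Nodup := by
  induction lines with
  | nil => intro _ _ _ h; simpa [euqB_collect] using h
  | cons line rest ih =>
    intro k im d hd
    simp only [euqB_collect]
    split_ifs <;> exact ih _ _ _ (by first | exact hd | exact PySem.Dict.nodup_keys_insert _ _ _ hd)

-- apply-side pointwise lemmas
lemma euqB_applyGroup_length (raw : String) : ∀ (ps : List Nat) (n : Int) (ls : List String),
    (euqB_applyGroup raw ps n ls).length = ls.length := by
  intro ps
  induction ps with
  | nil => intro n ls; rfl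
  | cons p t ih => intro n ls; simp [euqB_applyGroup, ih]

lemma euqB_apply_length : ∀ (gs : List (String × List Nat)) (ls : List String),
    (euqB_apply gs ls).length = ls.length := by
  intro gs
  induction gs with
  | nil => intro ls; rfl
  | cons g t ih => obtain ⟨r, ps⟩ := g; intro ls; simp [euqB_apply, ih, euqB_applyGroup_length]

lemma euqB_applyGroup_get_notmem (raw : String) : ∀ (ps : List Nat) (n : Int) (ls : List String)
    (i : Nat), i ∉ ps → (euqB_applyGroup raw ps n ls)[i]? = ls[i]? := by
  intro ps
  induction ps with
  | nil => intro n ls i _; rfl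
  | cons p t ih =>
    intro n ls i hi
    simp only [List.mem_cons, not_or] at hi
    simp only [euqB_applyGroup]
    rw [ih _ _ _ hi.2, List.getElem?_set_ne (fun h => hi.1 h.symm)]

lemma euqB_applyGroup_get_mem (raw : String) : ∀ (ps : List Nat) (n : Int) (ls : List String)
    (i : Nat), ps.Nodup → i ∈ ps → i < ls.length →
    (euqB_applyGroup raw ps n ls)[i]?
      = some ("id: " ++ raw ++ " " ++ PySem.Int.toStr (n + (ps.idxOf i : Int))) := by
  intro ps
  induction ps with
  | nil => intro _ _ i _ hi; simp at hi
  | cons p t ih =>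
    intro n ls i hnd hi hlen
    simp only [List.nodup_cons] at hnd
    simp only [euqB_applyGroup]
    by_cases hip : i = p
    · subst hip
      rw [euqB_applyGroup_get_notmem raw t _ _ i hnd.1]
      rw [List.getElem?_set_self hlen]
      simp
    · have hit : i ∈ t := by
        rcases List.mem_cons.mp hi with h | h
        · exact absurd h hip
        · exact h
      rw [ih (n+1) _ i hnd.2 hit (by simpa using hlen)]
      rw [List.idxOf_cons]
      have hb : (p == i) = false := by simp; exact fun h => hip h.symm
      rw [hb]
      simp only [cond_false]
      have harg : n + 1 + ((t.idxOf i : Nat) : Int) = n + (((t.idxOf i + 1 : Nat)) : Int) := by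
        push_cast; ring
      rw [harg]

lemma euqB_apply_get_untouched : ∀ (gs : List (String × List Nat)) (ls : List String) (i : Nat),
    (∀ rp ∈ gs, i ∉ rp.2.drop 1) → (euqB_apply gs ls)[i]? = ls[i]? := by
  intro gs
  induction gs with
  | nil => intro ls i _; rfl
  | cons g t ih =>
    obtain ⟨r, ps⟩ := g
    intro ls i h
    simp only [euqB_apply]
    rw [ih _ i (fun rp hrp => h rp (List.mem_cons_of_mem _ hrp))]
    exact euqB_applyGroup_get_notmem r _ _ _ i (h (r, ps) List.mem_cons_self)

lemma euqB_apply_get_touched (es : List (Option String)) :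
    ∀ (gs : List (String × List Nat)) (ls : List String) (r : String) (ps : List Nat) (i : Nat),
    ls.length = es.length →
    (∀ rp ∈ gs, ∀ p ∈ rp.2, es.getD p none = some rp.1) →
    (∀ rp ∈ gs, rp.2.Nodup) →
    (gs.map Prod.fst).Nodup →
    (r, ps) ∈ gs → i ∈ ps.drop 1 → i < ls.length →
    (euqB_apply gs ls)[i]?
      = some ("id: " ++ r ++ " " ++ PySem.Int.toStr (2 + ((ps.drop 1).idxOf i : Int))) := by
  intro gs
  induction gs with
  | nil => intro _ _ _ _ _ _ _ _ hmem; simp at hmem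
  | cons g t ih =>
    obtain ⟨r', ps'⟩ := g
    intro ls r ps i hlen hgood hnd hkeys hmem hi hilen
    have hes : es.getD i none = some r :=
      hgood (r, ps) hmem i (List.mem_of_mem_drop hi)
    simp only [List.map_cons, List.nodup_cons] at hkeys
    simp only [euqB_apply]
    rcases List.mem_cons.mp hmem with heq | htail
    · -- the group is the head; later groups never touch i
      have hr : r' = r := congrArg Prod.fst heq.symm
      have hps : ps' = ps := congrArg Prod.snd heq.symm
      subst hr; subst hps
      rw [euqB_apply_get_untouched t _ i ?_]
      · exact euqB_applyGroup_get_mem r' _ 2 ls i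
          (List.Nodup.sublist (List.drop_sublist _ _) (hnd (r', ps') List.mem_cons_self))
          hi hilen
      · intro rp hrp hdrop
        have h2 : es.getD i none = some rp.1 :=
          hgood rp (List.mem_cons_of_mem _ hrp) i (List.mem_of_mem_drop hdrop)
        have : rp.1 = r' := by
          have h3 := h2.symm.trans hes
          exact Option.some_inj.mp h3
        exact hkeys.1 (this ▸ List.mem_map_of_mem hrp)
    · -- the group is in the tail; the head group never touches i
      have hne : i ∉ ps'.drop 1 := by
        intro hdrop
        have h2 : es.getD i none = some r' :=
          hgood (r', ps') List.mem_cons_self i (List.mem_of_mem_drop hdrop)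
        have hr : r' = r := Option.some_inj.mp (h2.symm.trans hes)
        subst hr
        exact hkeys.1 (List.mem_map_of_mem htail)
      have hlen' : (euqB_applyGroup r' (ps'.drop 1) 2 ls).length = es.length := by
        rw [euqB_applyGroup_length]; exact hlen
      exact ih _ r ps i hlen'
        (fun rp hrp => hgood rp (List.mem_cons_of_mem _ hrp))
        (fun rp hrp => hnd rp (List.mem_cons_of_mem _ hrp))
        hkeys.2 htail hi (by rw [euqB_applyGroup_length]; exact hilen)

-- ===== VERDICT helper: list-level equality =====
lemma euq_lists (lines : List String) :
    euqA_go lines PySem.Dict.empty false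
      = euqB_apply (PySem.Dict.items (euqB_collect lines 0 false PySem.Dict.empty)) lines := by
  rw [euq_main lines false PySem.Dict.empty [] (by intro r; simp [PySem.Dict.getD_empty])]
  set es := euqE lines false with hes
  set d := euqB_collect lines 0 false PySem.Dict.empty with hd
  have hlen : lines.length = es.length := (euqE_length lines false).symm
  have hndk : d.keys.Nodup := euqB_collect_nodup lines 0 false _ (by
    simpa using PySem.Dict.nodup_keys_empty (κ := String) (ν := List Nat))
  have hgetD : ∀ r, PySem.Dict.getD d r [] = euqOcc r es 0 := by
    intro r
    rw [hd, euqB_collect_getD, PySem.Dict.getD_empty]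
    rw [List.nil_append, hes]
  have hitems : ∀ rp ∈ d.items, rp.2 = euqOcc rp.1 es 0 := by
    intro rp hrp
    obtain ⟨r, ps⟩ := rp
    have := PySem.Dict.getD_of_mem_items (d := d) (d0 := []) hrp hndk
    rw [hgetD r] at this
    exact this.symm
  have hgood : ∀ rp ∈ d.items, ∀ p ∈ rp.2, es.getD p none = some rp.1 := by
    intro rp hrp p hp
    rw [hitems rp hrp] at hp
    have := euqOcc_mem rp.1 es 0 p hp
    simpa using this.2.1
  have hndg : ∀ rp ∈ d.items, rp.2.Nodup := by
    intro rp hrp; rw [hitems rp hrp]; exact euqOcc_nodup _ _ _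
  have hkeys : (d.items.map Prod.fst).Nodup := by
    have hk : d.keys = d.items.map Prod.fst := by simp [PySem.Dict.keys]
    rwa [hk] at hndk
  apply List.ext_getElem?
  intro i
  by_cases hi : i < lines.length
  · -- pointwise comparison
    have hesi : i < es.length := by omega
    rcases he : es.getD i none with _ | r
    · -- not an eligible line: both sides keep it
      have hR2 : (euqR (lines.zip es) [])[i]? = some (lines.getD i "") := by
        have h := euqR_get lines es [] i hlen hi
        rw [he] at h
        exact h
      rw [hR2, euqB_apply_get_untouched _ lines i ?_]
      · simp [List.getD_eq_getElem?_getD, List.getElem?_eq_getElem hi]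
      · intro rp hrp hdrop
        have h2 := hgood rp hrp i (List.mem_of_mem_drop hdrop)
        rw [he] at h2
        simp at h2
    · -- eligible line with id r
      have hR2 : (euqR (lines.zip es) [])[i]?
          = some (if (es.take (i+1)).count (some r) > 1 then
              "id: " ++ r ++ " " ++ PySem.Int.toStr (((es.take (i+1)).count (some r) : Nat) : Int)
            else lines.getD i "") := by
        have h := euqR_get lines es [] i hlen hi
        rw [he] at h
        rw [List.nil_append] at h
        exact h
      have hocc : i ∈ euqOcc r es 0 := by
        have := euqOcc_mem_of r es 0 i he hesi
        simpa using this
      have hidx : (euqOcc r es 0).idxOf i + 1 = (es.take (i+1)).count (some r) := by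
        have := euqOcc_idx r es 0 i he hesi
        simpa using this
      rw [hR2]
      by_cases hc1 : (es.take (i+1)).count (some r) > 1
      · -- a duplicate: the group pass rewrites it
        rw [if_pos hc1]
        have hex : ∃ ps, (r, ps) ∈ d.items := by
          have hcon : PySem.Dict.getD d r [] ≠ [] := by
            rw [hgetD r]
            exact fun hnil => by rw [hnil] at hocc; simp at hocc
          cases hq : PySem.Dict.get? d r with
          | none =>
            exfalso
            apply hcon
            simp [PySem.Dict.getD, hq]
          | some v =>
            exact ⟨v, PySem.Dict.mem_items_of_get?_eq_some d hq⟩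
        obtain ⟨ps, hps⟩ := hex
        have hpsocc : ps = euqOcc r es 0 := hitems (r, ps) hps
        obtain ⟨h0, t0, hocc0⟩ : ∃ h0 t0, euqOcc r es 0 = h0 :: t0 := by
          cases hq : euqOcc r es 0 with
          | nil => rw [hq] at hocc; simp at hocc
          | cons a b => exact ⟨a, b, rfl⟩
        have hhne : h0 ≠ i := by
          intro hcontra
          rw [hocc0, hcontra] at hidx
          simp [List.idxOf_cons_self] at hidx
          omega
        have hit0 : i ∈ t0 := by
          have hmm := hocc
          rw [hocc0] at hmm
          rcases List.mem_cons.mp hmm with h | h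
          · exact absurd h.symm hhne
          · exact h
        have hdropm : i ∈ ps.drop 1 := by rw [hpsocc, hocc0]; simpa using hit0
        have hidxt : t0.idxOf i + 1 + 1 = (es.take (i+1)).count (some r) := by
          rw [hocc0, List.idxOf_cons] at hidx
          have hb : (h0 == i) = false := by simp [hhne]
          rw [hb] at hidx
          simpa using hidx
        rw [euqB_apply_get_touched es d.items lines r ps i hlen hgood hndg hkeys hps hdropm hi]
        have hdi : (ps.drop 1).idxOf i = t0.idxOf i := by rw [hpsocc, hocc0]; simp
        rw [hdi]
        have harg : ((((es.take (i+1)).count (some r) : Nat)) : Int)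
            = 2 + ((t0.idxOf i : Nat) : Int) := by
          push_cast
          omega
        rw [harg]
      · -- first occurrence: untouched on both sides
        rw [if_neg hc1]
        rw [euqB_apply_get_untouched _ lines i ?_]
        · simp [List.getD_eq_getElem?_getD, List.getElem?_eq_getElem hi]
        · intro rp hrp hdropc
          have h2 := hgood rp hrp i (List.mem_of_mem_drop hdropc)
          have hr : rp.1 = r := Option.some_inj.mp (h2.symm.trans he)
          have hps2 : rp.2 = euqOcc r es 0 := by rw [hitems rp hrp, hr]
          have hidx0 : (euqOcc r es 0).idxOf i = 0 := by omega
          obtain ⟨h0, t0, hocc0⟩ : ∃ h0 t0, euqOcc r es 0 = h0 :: t0 := by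
            cases hq : euqOcc r es 0 with
            | nil => rw [hq] at hocc; simp at hocc
            | cons a b => exact ⟨a, b, rfl⟩
          have hh0 : h0 = i := by
            rw [hocc0, List.idxOf_cons] at hidx0
            by_cases hbe : h0 = i
            · exact hbe
            · exfalso
              have hb : (h0 == i) = false := by simp [hbe]
              rw [hb] at hidx0
              simp at hidx0
          have hnd0 : (euqOcc r es 0).Nodup := euqOcc_nodup r es 0
          rw [hocc0] at hnd0
          have hnotin : i ∉ t0 := by rw [← hh0]; exact (List.nodup_cons.mp hnd0).1
          rw [hps2, hocc0] at hdropc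
          simp at hdropc
          exact hnotin hdropc
  · -- past the end: both none
    have h1 : (euqR (lines.zip es) []).length = lines.length := by
      rw [euqR_length]
      simp [List.length_zip]
      omega
    have h2 : (euqB_apply d.items lines).length = lines.length := euqB_apply_length _ _
    rw [List.getElem?_eq_none (by omega), List.getElem?_eq_none (by omega)]

-- ===== VERDICT (by name: the statement is the Claim_ definition above) =====
theorem ensure_unique_question_ids_py_spec : Claim_equal_ensure_unique_question_ids_py := by
  intro yaml_text _
  simp only [Spec_ensure_unique_question_ids_py, ensure_unique_question_ids_py,
    ensure_unique_question_ids_py_alt]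
  rw [euq_lists (PySem.Str.splitlines yaml_text)]
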